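-- pv_equiv track=rewrite | github.com/mlesnews/lumina-oss | scripts/python/security_audit_marvin_teams.py | coordinate_team_fixes
-- ===== SOURCE A (Python) =====
-- from typing import Dict, List, Any
--
-- def coordinate_team_fixes(findings: List[Dict[str, Any]]) -> Dict[str, List[Dict[str, Any]]]:
--     """Coordinate fixes with support teams"""
--     teams = {
--         "InfoSec Team": [],
--         "Storage Team": [],
--         "System Team": [],
--         "Network Team": []
--     }
--
--     for finding in findings:
--         team = finding.get("team", "System Team")
--         if team in teams:
--             teams[team].append(finding)
--         else:
--             teams["System Team"].append(finding)
--
--     return teams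
-- ===== SOURCE B (Python) =====
-- from typing import Dict, List, Any
--
-- TEAM_NAMES = ["InfoSec Team", "Storage Team", "System Team", "Network Team"]
--
-- def _assigned_team(finding: Dict[str, Any]) -> str:
--     t = finding.get("team", "System Team")
--     return t if t in TEAM_NAMES else "System Team"
--
-- def coordinate_team_fixes(findings: List[Dict[str, Any]]) -> Dict[str, List[Dict[str, Any]]]:
--     """Coordinate fixes with support teams"""
--     return {name: [f for f in findings if _assigned_team(f) == name]
--             for name in TEAM_NAMES}
-- ===== Notes on version B (the rewrite author's own statement) =====
-- stated objective: simpler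
-- what changed: Replaces the single distributing loop with mutable buckets by an assignment rule plus a dict comprehension that filters the findings once per team name.
import Mathlib
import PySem

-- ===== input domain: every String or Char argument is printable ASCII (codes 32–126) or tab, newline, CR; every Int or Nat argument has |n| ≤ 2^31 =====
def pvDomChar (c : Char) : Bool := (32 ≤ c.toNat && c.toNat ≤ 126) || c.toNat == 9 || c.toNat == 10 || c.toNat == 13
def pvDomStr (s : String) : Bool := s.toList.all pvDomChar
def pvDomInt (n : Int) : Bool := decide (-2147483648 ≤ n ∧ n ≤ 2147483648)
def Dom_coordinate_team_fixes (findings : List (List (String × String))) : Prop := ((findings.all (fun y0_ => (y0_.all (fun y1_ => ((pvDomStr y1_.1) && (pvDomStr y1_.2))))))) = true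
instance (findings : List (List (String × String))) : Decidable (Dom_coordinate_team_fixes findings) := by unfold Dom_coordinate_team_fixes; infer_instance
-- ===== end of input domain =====

-- B replaces A's single distributing loop over mutable buckets by an assignment rule and a per-team filtering pass (simpler decomposition, same results).

-- ===== PORT A =====
-- one step of A's for-loop: look up the team, append into the matching bucket or into "System Team"
def pvStepA (teams : PySem.Dict String (List (List (String × String)))) (finding : List (String × String)) :
    PySem.Dict String (List (List (String × String))) :=
  let team := (PySem.Dict.mk finding).getD "team" "System Team"
  if teams.contains team then teams.modify team [] (fun l => l ++ [finding])
  else teams.modify "System Team" [] (fun l => l ++ [finding])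

def coordinate_team_fixes (findings : List (List (String × String))) : List (String × List (List (String × String))) :=
  let teams : PySem.Dict String (List (List (String × String))) :=
    PySem.Dict.mk [("InfoSec Team", []), ("Storage Team", []), ("System Team", []), ("Network Team", [])]
  (findings.foldl pvStepA teams).items

-- ===== PORT B =====
def pvTeamNames : List String := ["InfoSec Team", "Storage Team", "System Team", "Network Team"]

def pvAssignedTeam (finding : List (String × String)) : String :=
  let t := (PySem.Dict.mk finding).getD "team" "System Team"
  if t ∈ pvTeamNames then t else "System Team"

def coordinate_team_fixes_alt (findings : List (List (String × String))) : List (String × List (List (String × String))) :=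
  pvTeamNames.map (fun name => (name, findings.filter (fun f => pvAssignedTeam f == name)))

-- ===== PRECONDITION & SPEC =====
def Spec_coordinate_team_fixes (findings : List (List (String × String))) (out : List (String × List (List (String × String)))) : Prop := out = coordinate_team_fixes_alt findings
instance (findings : List (List (String × String))) (out : List (String × List (List (String × String)))) : Decidable (Spec_coordinate_team_fixes findings out) := by unfold Spec_coordinate_team_fixes; infer_instance

-- ===== CLAIM (what is proved, stated in full; the proofs are below) =====
def Claim_equal_coordinate_team_fixes : Prop := ∀ (findings : List (List (String × String))), Dom_coordinate_team_fixes findings → Spec_coordinate_team_fixes findings (coordinate_team_fixes findings)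

-- ===== LEMMAS AND PROOFS =====

-- inserting at an existing key of the literal 4-key dict overwrites that bucket in place
theorem pvIns1 (a b c d v : List (List (String × String))) :
    (PySem.Dict.mk [("InfoSec Team", a), ("Storage Team", b), ("System Team", c), ("Network Team", d)]).insert "InfoSec Team" v = PySem.Dict.mk [("InfoSec Team", v), ("Storage Team", b), ("System Team", c), ("Network Team", d)] := by
  apply PySem.Dict.ext; rfl

theorem pvIns2 (a b c d v : List (List (String × String))) :
    (PySem.Dict.mk [("InfoSec Team", a), ("Storage Team", b), ("System Team", c), ("Network Team", d)]).insert "Storage Team" v = PySem.Dict.mk [("InfoSec Team", a), ("Storage Team", v), ("System Team", c), ("Network Team", d)] := by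
  apply PySem.Dict.ext; rfl

theorem pvIns3 (a b c d v : List (List (String × String))) :
    (PySem.Dict.mk [("InfoSec Team", a), ("Storage Team", b), ("System Team", c), ("Network Team", d)]).insert "System Team" v = PySem.Dict.mk [("InfoSec Team", a), ("Storage Team", b), ("System Team", v), ("Network Team", d)] := by
  apply PySem.Dict.ext; rfl

theorem pvIns4 (a b c d v : List (List (String × String))) :
    (PySem.Dict.mk [("InfoSec Team", a), ("Storage Team", b), ("System Team", c), ("Network Team", d)]).insert "Network Team" v = PySem.Dict.mk [("InfoSec Team", a), ("Storage Team", b), ("System Team", c), ("Network Team", v)] := by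
  apply PySem.Dict.ext; rfl

-- invariant of A's loop: folding appends, per bucket, exactly the findings B's filter selects
theorem pvFold_items (xs : List (List (String × String))) :
    ∀ (a b c d : List (List (String × String))),
    (xs.foldl pvStepA (PySem.Dict.mk [("InfoSec Team", a), ("Storage Team", b), ("System Team", c), ("Network Team", d)])).items =
      [("InfoSec Team", a ++ xs.filter (fun f => pvAssignedTeam f == "InfoSec Team")),
       ("Storage Team", b ++ xs.filter (fun f => pvAssignedTeam f == "Storage Team")),
       ("System Team", c ++ xs.filter (fun f => pvAssignedTeam f == "System Team")),
       ("Network Team", d ++ xs.filter (fun f => pvAssignedTeam f == "Network Team"))] := by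
  induction xs with
  | nil => intro a b c d; simp
  | cons x xs ih =>
    intro a b c d
    rw [List.foldl_cons]
    by_cases h1 : (PySem.Dict.mk x).getD "team" "System Team" = "InfoSec Team"
    · rw [show pvStepA (PySem.Dict.mk [("InfoSec Team", a), ("Storage Team", b), ("System Team", c), ("Network Team", d)]) x = PySem.Dict.mk [("InfoSec Team", (a ++ [x])), ("Storage Team", b), ("System Team", c), ("Network Team", d)] from by
        simp only [pvStepA, h1]
        simp [PySem.Dict.contains, PySem.Dict.modify, PySem.Dict.getD, PySem.Dict.get?, pvIns1]]
      rw [ih]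
      simp [pvAssignedTeam, pvTeamNames, h1, List.filter_cons]
    · by_cases h2 : (PySem.Dict.mk x).getD "team" "System Team" = "Storage Team"
      · rw [show pvStepA (PySem.Dict.mk [("InfoSec Team", a), ("Storage Team", b), ("System Team", c), ("Network Team", d)]) x = PySem.Dict.mk [("InfoSec Team", a), ("Storage Team", (b ++ [x])), ("System Team", c), ("Network Team", d)] from by
          simp only [pvStepA, h2]
          simp [PySem.Dict.contains, PySem.Dict.modify, PySem.Dict.getD, PySem.Dict.get?, pvIns2]]
        rw [ih]
        simp [pvAssignedTeam, pvTeamNames, h1, h2, List.filter_cons]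
      · by_cases h3 : (PySem.Dict.mk x).getD "team" "System Team" = "System Team"
        · rw [show pvStepA (PySem.Dict.mk [("InfoSec Team", a), ("Storage Team", b), ("System Team", c), ("Network Team", d)]) x = PySem.Dict.mk [("InfoSec Team", a), ("Storage Team", b), ("System Team", (c ++ [x])), ("Network Team", d)] from by
            simp only [pvStepA, h3]
            simp [PySem.Dict.contains, PySem.Dict.modify, PySem.Dict.getD, PySem.Dict.get?, pvIns3]]
          rw [ih]
          simp [pvAssignedTeam, pvTeamNames, h1, h2, h3, List.filter_cons]
        · by_cases h4 : (PySem.Dict.mk x).getD "team" "System Team" = "Network Team"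
          · rw [show pvStepA (PySem.Dict.mk [("InfoSec Team", a), ("Storage Team", b), ("System Team", c), ("Network Team", d)]) x = PySem.Dict.mk [("InfoSec Team", a), ("Storage Team", b), ("System Team", c), ("Network Team", (d ++ [x]))] from by
              simp only [pvStepA, h4]
              simp [PySem.Dict.contains, PySem.Dict.modify, PySem.Dict.getD, PySem.Dict.get?, pvIns4]]
            rw [ih]
            simp [pvAssignedTeam, pvTeamNames, h1, h2, h3, h4, List.filter_cons]
          · rw [show pvStepA (PySem.Dict.mk [("InfoSec Team", a), ("Storage Team", b), ("System Team", c), ("Network Team", d)]) x = PySem.Dict.mk [("InfoSec Team", a), ("Storage Team", b), ("System Team", (c ++ [x])), ("Network Team", d)] from by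
              simp only [pvStepA, PySem.Dict.contains_mk]
              rw [if_neg (by simp [Ne.symm h1, Ne.symm h2, Ne.symm h3, Ne.symm h4])]
              simp [PySem.Dict.modify, PySem.Dict.getD, PySem.Dict.get?, pvIns3]]
            rw [ih]
            simp [pvAssignedTeam, pvTeamNames, h1, h2, h3, h4, List.filter_cons]

-- ===== VERDICT (by name: the statement is the Claim_ definition above) =====
theorem coordinate_team_fixes_spec : Claim_equal_coordinate_team_fixes := by
  intro findings _
  unfold Spec_coordinate_team_fixes coordinate_team_fixes coordinate_team_fixes_alt
  simp [pvFold_items, pvTeamNames]
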